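-- pv_equiv track=rewrite | github.com/Fedioun/annotation_tool | src/filtering.py | bound_new_lines
-- ===== SOURCE A (Python) =====
-- def bound_new_lines(tokens):
-- 	filtered = []
-- 	c = 0
-- 	for token in tokens:
-- 		if token["text"] == "[n]":
-- 			c+=1
-- 			if c < 3:
-- 				filtered.append(token)
-- 		else:
-- 			c=0
-- 			filtered.append(token)
-- 	return filtered
-- ===== SOURCE B (Python) =====
-- def bound_new_lines(tokens):
-- 	out = []
-- 	i = 0
-- 	n = len(tokens)
-- 	while i < n:
-- 		key = tokens[i]["text"] == "[n]"
-- 		j = i + 1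
-- 		while j < n and (tokens[j]["text"] == "[n]") == key:
-- 			j += 1
-- 		out.extend(tokens[i:min(i + 2, j)] if key else tokens[i:j])
-- 		i = j
-- 	return out
-- ===== Notes on version B (the rewrite author's own statement) =====
-- stated objective: alternative
-- what changed: B scans maximal runs of equal newline-ness (a hand-rolled groupby) and emits each run whole, truncated to its first two tokens when it is a newline run, instead of A's per-token counter with conditional appends.
import Mathlib
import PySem

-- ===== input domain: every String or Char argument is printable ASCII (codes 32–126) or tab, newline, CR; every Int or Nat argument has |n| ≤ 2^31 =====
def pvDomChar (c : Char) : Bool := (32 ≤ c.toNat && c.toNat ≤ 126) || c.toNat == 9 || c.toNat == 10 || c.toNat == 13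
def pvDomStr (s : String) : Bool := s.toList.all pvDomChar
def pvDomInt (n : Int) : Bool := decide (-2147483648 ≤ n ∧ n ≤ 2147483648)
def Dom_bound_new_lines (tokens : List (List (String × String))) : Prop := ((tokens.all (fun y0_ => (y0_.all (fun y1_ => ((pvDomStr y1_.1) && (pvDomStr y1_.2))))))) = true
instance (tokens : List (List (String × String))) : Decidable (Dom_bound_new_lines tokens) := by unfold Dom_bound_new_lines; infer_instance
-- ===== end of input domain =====

-- B replaces A's per-token newline counter by a run-based scan (a hand-rolled groupby):
-- it finds each maximal run of tokens with equal newline-ness and emits it whole, truncated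
-- to its first two tokens when it is a newline run. Same cost; alternative decomposition.

-- shared helper: token["text"] == "[n]" (first-match association-list lookup; Pre_ guarantees the key exists)
def pvIsNL (t : List (String × String)) : Bool :=
  (((t.find? (fun kv => kv.1 == "text")).map (fun kv => kv.2)).getD "") == "[n]"

-- ===== PORT A =====
def bound_new_lines (tokens : List (List (String × String))) : List (List (String × String)) :=
  (tokens.foldl
    (fun (st : List (List (String × String)) × Nat) token =>
      if pvIsNL token then
        let c := st.2 + 1
        (if c < 3 then st.1 ++ [token] else st.1, c)
      else
        (st.1 ++ [token], 0))
    ([], 0)).1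

-- ===== PORT B =====
-- run-based scan: take the maximal run with the head's newline-ness, emit it (truncated to 2 if newline), recurse
def pvAltGo : List (List (String × String)) → List (List (String × String))
  | [] => []
  | t :: rest =>
    let key := pvIsNL t
    let run := t :: rest.takeWhile (fun x => pvIsNL x == key)
    let rest' := rest.dropWhile (fun x => pvIsNL x == key)
    (if key then run.take 2 else run) ++ pvAltGo rest'
termination_by l => l.length
decreasing_by
  simp only [List.length_cons]
  exact Nat.lt_succ_of_le (List.length_dropWhile_le _ _)

def bound_new_lines_alt (tokens : List (List (String × String))) : List (List (String × String)) :=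
  pvAltGo tokens

-- ===== PRECONDITION & SPEC =====
-- Pre_ excludes tokens missing the "text" key, on which Python A raises KeyError.
def Pre_bound_new_lines (tokens : List (List (String × String))) : Prop :=
  ∀ t ∈ tokens, (t.find? (fun kv => kv.1 == "text")).isSome
instance (tokens : List (List (String × String))) : Decidable (Pre_bound_new_lines tokens) := by
  unfold Pre_bound_new_lines; infer_instance

def pvWitness_bound_new_lines : (List (List (String × String))) :=
  [[("text", "a")], [("text", "[n]")], [("text", "[n]")], [("text", "[n]")], [("text", "b")]]

def Spec_bound_new_lines (tokens : List (List (String × String))) (out : List (List (String × String))) : Prop := out = bound_new_lines_alt tokens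
instance (tokens : List (List (String × String))) (out : List (List (String × String))) : Decidable (Spec_bound_new_lines tokens out) := by unfold Spec_bound_new_lines; infer_instance

-- ===== CLAIM (what is proved, stated in full; the proofs are below) =====
def Claim_equal_bound_new_lines : Prop := ∀ (tokens : List (List (String × String))), Dom_bound_new_lines tokens → Pre_bound_new_lines tokens → Spec_bound_new_lines tokens (bound_new_lines tokens)

-- ===== LEMMAS AND PROOFS =====

-- reference recursion with an explicit counter (A's loop, written structurally)
def pvGoA : List (List (String × String)) → Nat → List (List (String × String))
  | [], _ => []
  | t :: rest, c =>
    if pvIsNL t then (if c + 1 < 3 then [t] else []) ++ pvGoA rest (c + 1)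
    else t :: pvGoA rest 0

lemma foldl_eq_goA (ts : List (List (String × String))) :
    ∀ (acc : List (List (String × String))) (c : Nat),
      (ts.foldl
        (fun (st : List (List (String × String)) × Nat) token =>
          if pvIsNL token then
            let c := st.2 + 1
            (if c < 3 then st.1 ++ [token] else st.1, c)
          else
            (st.1 ++ [token], 0))
        (acc, c)).1 = acc ++ pvGoA ts c := by
  induction ts with
  | nil => intro acc c; simp [pvGoA]
  | cons t rest ih =>
    intro acc c
    by_cases h : pvIsNL t = true
    · by_cases h2 : c + 1 < 3
      · simp only [List.foldl_cons, h, h2, ih, pvGoA, if_true]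
        simp
      · simp only [List.foldl_cons, h, h2, ih, pvGoA, if_true]
        simp
    · simp only [List.foldl_cons, h, Bool.false_eq_true, if_false, ih, pvGoA]
      simp

-- a counter value is irrelevant when the next token (if any) is not a newline
lemma goA_counter_irrel (rest : List (List (String × String)))
    (h : rest = [] ∨ ∃ x xs, rest = x :: xs ∧ pvIsNL x = false) (c : Nat) :
    pvGoA rest c = pvGoA rest 0 := by
  rcases h with h | ⟨x, xs, rfl, hx⟩
  · subst h; rfl
  · simp [pvGoA, hx]

-- newline run: emits take (2 - c), counter grows by the run length
lemma goA_nl_run (run : List (List (String × String))) :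
    ∀ (rest' : List (List (String × String))) (c : Nat),
      (∀ x ∈ run, pvIsNL x = true) →
      pvGoA (run ++ rest') c = run.take (2 - c) ++ pvGoA rest' (c + run.length) := by
  induction run with
  | nil => intro rest' c _; simp
  | cons x xs ih =>
    intro rest' c hall
    have hx : pvIsNL x = true := hall x (List.mem_cons_self)
    have hxs : ∀ y ∈ xs, pvIsNL y = true := fun y hy => hall y (List.mem_cons_of_mem _ hy)
    have hlen : c + 1 + xs.length = c + (x :: xs).length := by
      simp only [List.length_cons]; omega
    simp only [List.cons_append, pvGoA, hx, if_true]
    rw [ih rest' (c + 1) hxs, hlen]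
    by_cases h2 : c + 1 < 3
    · rw [if_pos h2]
      have ht : 2 - c = (2 - (c + 1)) + 1 := by omega
      rw [ht, List.take_succ_cons]
      simp
    · rw [if_neg h2]
      have ht : 2 - c = 0 := by omega
      have ht2 : 2 - (c + 1) = 0 := by omega
      rw [ht, ht2]
      simp

-- non-newline run passes through unchanged (counter stays 0)
lemma goA_nonnl_run (run : List (List (String × String))) :
    ∀ (rest' : List (List (String × String))),
      (∀ x ∈ run, pvIsNL x = false) →
      pvGoA (run ++ rest') 0 = run ++ pvGoA rest' 0 := by
  induction run with
  | nil => intro rest' _; simp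
  | cons x xs ih =>
    intro rest' hall
    have hx : pvIsNL x = false := hall x (List.mem_cons_self)
    have hxs : ∀ y ∈ xs, pvIsNL y = false := fun y hy => hall y (List.mem_cons_of_mem _ hy)
    simp [pvGoA, hx, ih rest' hxs]

lemma dropWhile_shape {α : Type} (p : α → Bool) (l : List α) :
    l.dropWhile p = [] ∨ ∃ x xs, l.dropWhile p = x :: xs ∧ p x = false := by
  induction l with
  | nil => left; rfl
  | cons a as ih =>
    by_cases h : p a = true
    · simpa [List.dropWhile, h] using ih
    · right; exact ⟨a, as, by simp [List.dropWhile, h], by simpa using h⟩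

lemma altGo_eq_goA_aux : ∀ (n : Nat) (ts : List (List (String × String))),
    ts.length ≤ n → pvAltGo ts = pvGoA ts 0 := by
  intro n
  induction n with
  | zero =>
    intro ts h
    have : ts = [] := List.eq_nil_of_length_eq_zero (Nat.le_zero.mp h)
    subst this
    simp [pvAltGo, pvGoA]
  | succ n ihn =>
    intro ts h
    match ts with
    | [] => simp [pvAltGo, pvGoA]
    | t :: rest =>
      have hdlen : (rest.dropWhile (fun x => pvIsNL x == pvIsNL t)).length ≤ n :=
        le_trans (List.length_dropWhile_le _ _)
          (by simpa using Nat.le_of_succ_le_succ h)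
      have ih := ihn _ hdlen
      have hsplit : t :: rest
          = (t :: rest.takeWhile (fun x => pvIsNL x == pvIsNL t))
            ++ rest.dropWhile (fun x => pvIsNL x == pvIsNL t) := by
        simp [List.takeWhile_append_dropWhile]
      simp only [pvAltGo]
      rw [ih]
      by_cases hk : pvIsNL t = true
      · have hall : ∀ x ∈ t :: rest.takeWhile (fun x => pvIsNL x == pvIsNL t),
            pvIsNL x = true := by
          intro x hx
          rcases List.mem_cons.mp hx with rfl | hx'
          · exact hk
          · have := List.mem_takeWhile_imp hx'
            simpa [hk] using this
        have hirrel : pvGoA (rest.dropWhile (fun x => pvIsNL x == pvIsNL t))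
              (0 + (t :: rest.takeWhile (fun x => pvIsNL x == pvIsNL t)).length)
            = pvGoA (rest.dropWhile (fun x => pvIsNL x == pvIsNL t)) 0 := by
          apply goA_counter_irrel
          rcases dropWhile_shape (fun x => pvIsNL x == pvIsNL t) rest with hsh | ⟨x, xs, hx, hpx⟩
          · left; exact hsh
          · right; exact ⟨x, xs, hx, by simpa [hk] using hpx⟩
        rw [if_pos hk]
        conv_rhs => rw [hsplit]
        rw [goA_nl_run _ _ 0 hall, hirrel]
      · have hk' : pvIsNL t = false := by simpa using hk
        have hall : ∀ x ∈ t :: rest.takeWhile (fun x => pvIsNL x == pvIsNL t),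
            pvIsNL x = false := by
          intro x hx
          rcases List.mem_cons.mp hx with rfl | hx'
          · exact hk'
          · have := List.mem_takeWhile_imp hx'
            simpa [hk'] using this
        rw [if_neg hk]
        conv_rhs => rw [hsplit]
        rw [goA_nonnl_run _ _ hall]

lemma altGo_eq_goA (ts : List (List (String × String))) : pvAltGo ts = pvGoA ts 0 :=
  altGo_eq_goA_aux ts.length ts le_rfl

-- ===== VERDICT (by name: the statement is the Claim_ definition above) =====
theorem bound_new_lines_spec : Claim_equal_bound_new_lines := by
  intro tokens _ _
  show bound_new_lines tokens = bound_new_lines_alt tokens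
  rw [bound_new_lines, bound_new_lines_alt, altGo_eq_goA, foldl_eq_goA]
  simp
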